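-- pv_equiv track=rewrite | github.com/mdzgr/MERGE | vizualize.py | get_common_tokens_between_sentences
-- ===== SOURCE A (Python) =====
-- def get_tokens_for_position(sentence_data, token_pos):
--     """Get all suggestion tokens for a specific token position"""
--     tokens = set()
--     if token_pos in sentence_data:
--         for score_key in sentence_data[token_pos]:
--             for suggestion in sentence_data[token_pos][score_key]:
--                 token = suggestion.split(':')[0]
--                 tokens.add(token)
--     return tokens
--
-- def get_common_tokens_between_sentences(data1, data2):
--     """Get tokens that appear in suggestions for both sentences"""
--     all_positions = set(data1.keys()) | set(data2.keys())
--     common_tokens = set() #and updated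
--
--     for pos in all_positions:
--         tokens1 = get_tokens_for_position(data1, pos) #for x postions in P
--         tokens2 = get_tokens_for_position(data2, pos) #and H
--         common_tokens.update(tokens1 & tokens2) #intresection number
--
--     return common_tokens
-- ===== SOURCE B (Python) =====
-- def get_common_tokens_between_sentences(data1, data2):
--     """Get tokens that appear in suggestions for both sentences"""
--     def position_token_pairs(data):
--         # flatten the whole dict into one set of (position, token) pairs
--         return {(pos, suggestion.split(':')[0])
--                 for pos, scores in data.items()
--                 for suggestions in scores.values()
--                 for suggestion in suggestions}
--     common_pairs = position_token_pairs(data1) & position_token_pairs(data2)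
--     return {token for _pos, token in common_pairs}
-- ===== Notes on version B (the rewrite author's own statement) =====
-- stated objective: simpler
-- what changed: Instead of looping over the union of all positions and intersecting per-position token sets, B flattens each dict once into a single set of (position, token) pairs, takes one global pair-set intersection, and projects the tokens out of it.
import Mathlib
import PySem

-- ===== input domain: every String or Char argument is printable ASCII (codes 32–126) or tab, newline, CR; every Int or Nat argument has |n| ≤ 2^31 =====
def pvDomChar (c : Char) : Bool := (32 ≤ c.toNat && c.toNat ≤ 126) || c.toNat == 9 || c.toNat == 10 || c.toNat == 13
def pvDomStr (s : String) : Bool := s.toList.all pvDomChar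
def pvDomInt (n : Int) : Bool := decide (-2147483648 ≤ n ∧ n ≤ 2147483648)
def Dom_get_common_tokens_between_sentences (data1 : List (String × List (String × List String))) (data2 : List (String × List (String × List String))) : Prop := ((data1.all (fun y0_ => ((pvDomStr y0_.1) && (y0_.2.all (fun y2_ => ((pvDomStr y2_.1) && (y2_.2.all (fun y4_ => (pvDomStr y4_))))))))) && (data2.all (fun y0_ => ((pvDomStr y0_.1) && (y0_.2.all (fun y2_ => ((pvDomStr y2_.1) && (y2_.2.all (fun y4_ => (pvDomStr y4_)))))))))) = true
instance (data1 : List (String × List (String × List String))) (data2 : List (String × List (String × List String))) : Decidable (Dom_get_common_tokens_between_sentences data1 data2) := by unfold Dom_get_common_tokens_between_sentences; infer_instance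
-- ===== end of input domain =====

-- ===== PORT A =====
-- B flattens each dict into one global set of (position, token) pairs and intersects once,
-- instead of A's per-position token-set intersections over the union of positions (objective: simpler).

-- suggestion.split(':')[0]: split with a nonempty separator is never empty, so [0] is the head (exact)
def pvTok (s : String) : String := (((PySem.Str.split? s ":").getD []).headD "")

def get_tokens_for_position (sentence_data : List (String × List (String × List String))) (token_pos : String) : PySem.Set String :=
  let d := PySem.Dict.mk sentence_data
  if d.contains token_pos then
    let inner := PySem.Dict.mk (d.getD token_pos [])
    inner.keys.foldl (fun tokens score_key =>
      (inner.getD score_key []).foldl (fun tokens suggestion =>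
        PySem.Set.add tokens (pvTok suggestion)) tokens) PySem.Set.empty
  else PySem.Set.empty

def get_common_tokens_between_sentences (data1 : List (String × List (String × List String))) (data2 : List (String × List (String × List String))) : List String :=
  let all_positions := PySem.Set.union (PySem.Set.ofList (PySem.Dict.mk data1).keys) (PySem.Set.ofList (PySem.Dict.mk data2).keys)
  all_positions.foldl (fun common_tokens pos =>
    PySem.Set.update common_tokens
      (PySem.Set.inter (get_tokens_for_position data1 pos) (get_tokens_for_position data2 pos)))
    PySem.Set.empty

-- ===== PORT B =====
-- the set comprehension building {(pos, suggestion.split(':')[0]) ...} in one pass over data.items()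
def pvPairs (data : List (String × List (String × List String))) : PySem.Set (String × String) :=
  (PySem.Dict.mk data).items.foldl (fun pairs item =>
    (PySem.Dict.mk item.2).values.foldl (fun pairs suggestions =>
      suggestions.foldl (fun pairs suggestion =>
        PySem.Set.add pairs (item.1, pvTok suggestion)) pairs) pairs)
    PySem.Set.empty

def get_common_tokens_between_sentences_alt (data1 : List (String × List (String × List String))) (data2 : List (String × List (String × List String))) : List String :=
  (PySem.Set.inter (pvPairs data1) (pvPairs data2)).foldl
    (fun tokens pr => PySem.Set.add tokens pr.2) PySem.Set.empty

-- ===== PRECONDITION & SPEC =====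
-- Pre_ excludes association lists with duplicate keys (at the outer or an inner level): a Python
-- dict cannot contain duplicate keys, so such lists represent no input the Python programs accept.
def Pre_get_common_tokens_between_sentences (data1 : List (String × List (String × List String))) (data2 : List (String × List (String × List String))) : Prop :=
  (data1.map Prod.fst).Nodup ∧ (data2.map Prod.fst).Nodup ∧
  (∀ p ∈ data1, (p.2.map Prod.fst).Nodup) ∧ (∀ p ∈ data2, (p.2.map Prod.fst).Nodup)
instance (data1 : List (String × List (String × List String))) (data2 : List (String × List (String × List String))) : Decidable (Pre_get_common_tokens_between_sentences data1 data2) := by unfold Pre_get_common_tokens_between_sentences; infer_instance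

def pvWitness_get_common_tokens_between_sentences : (List (String × List (String × List String))) × (List (String × List (String × List String))) :=
  ([("0", [("s1", ["cat:0.9", "dog"])]), ("1", [("s1", ["fish"])])],
   [("0", [("s2", ["cat:0.4"]), ("s3", ["bird"])])])

def Spec_get_common_tokens_between_sentences (data1 : List (String × List (String × List String))) (data2 : List (String × List (String × List String))) (out : List String) : Prop := out = get_common_tokens_between_sentences_alt data1 data2
instance (data1 : List (String × List (String × List String))) (data2 : List (String × List (String × List String))) (out : List String) : Decidable (Spec_get_common_tokens_between_sentences data1 data2 out) := by unfold Spec_get_common_tokens_between_sentences; infer_instance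

-- ===== CLAIM (what is proved, stated in full; the proofs are below) =====
def Claim_equal_get_common_tokens_between_sentences : Prop := ∀ (data1 : List (String × List (String × List String))) (data2 : List (String × List (String × List String))), Dom_get_common_tokens_between_sentences data1 data2 → Pre_get_common_tokens_between_sentences data1 data2 → Spec_get_common_tokens_between_sentences data1 data2 (get_common_tokens_between_sentences data1 data2)

-- ===== LEMMAS AND PROOFS =====

-- the flattened token list of one inner dict (items-based)
def pvTT (it : String × List (String × List String)) : List String :=
  it.2.flatMap (fun kv => kv.2.map pvTok)

-- the flattened (position, token) pair list of one data dict
def pvPL (data : List (String × List (String × List String))) : List (String × String) :=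
  data.flatMap (fun it => (pvTT it).map (fun tok => (it.1, tok)))

theorem pv_update_of_subset {α : Type} [BEq α] [LawfulBEq α] (s : PySem.Set α) (l : List α)
    (h : ∀ y ∈ l, y ∈ s) : PySem.Set.update s l = s := by
  rw [PySem.Set.update_eq_append_filter]
  have : (PySem.Set.ofList l).filter (fun y => !s.contains y) = [] := by
    rw [List.filter_eq_nil_iff]
    intro y hy
    have : y ∈ s := h y ((PySem.Set.mem_ofList l y).mp hy)
    simp [this]
  rw [this, List.append_nil]

theorem pv_update_ofList {α : Type} [BEq α] [LawfulBEq α] (s : PySem.Set α) (xs : List α) :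
    PySem.Set.update s (PySem.Set.ofList xs) = PySem.Set.update s xs := by
  induction xs using List.reverseRecOn with
  | nil => simp [PySem.Set.ofList_nil]
  | append_singleton xs x ih =>
    rw [PySem.Set.ofList_append_singleton, PySem.Set.update_append]
    by_cases hx : x ∈ xs
    · rw [PySem.Set.add_of_mem ((PySem.Set.mem_ofList xs x).mpr hx), ih]
      have hxu : x ∈ PySem.Set.update s xs := (PySem.Set.mem_update s xs x).mpr (Or.inr hx)
      have h1 : PySem.Set.update (PySem.Set.update s xs) [x]
          = PySem.Set.add (PySem.Set.update s xs) x := rfl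
      rw [h1, PySem.Set.add_of_mem hxu]
    · rw [PySem.Set.add_of_not_mem (fun hc => hx ((PySem.Set.mem_ofList xs x).mp hc)),
        PySem.Set.update_append, ih]

theorem pv_foldl_update {α β : Type} [BEq α] [LawfulBEq α] (l : List β) (g : β → List α) (s : PySem.Set α) :
    l.foldl (fun s b => PySem.Set.update s (g b)) s = PySem.Set.update s (l.flatMap g) := by
  induction l generalizing s with
  | nil => simp [PySem.Set.update_nil]
  | cons a l ih => rw [List.foldl_cons, ih, List.flatMap_cons, PySem.Set.update_append]

theorem pv_filter_add {α : Type} [BEq α] [LawfulBEq α] (s : PySem.Set α) (x : α) (p : α → Bool) :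
    (PySem.Set.add s x).filter p = if p x then PySem.Set.add (s.filter p) x else s.filter p := by
  by_cases hx : x ∈ s
  · rw [PySem.Set.add_of_mem hx]
    by_cases hp : p x = true
    · have : x ∈ s.filter p := List.mem_filter.mpr ⟨hx, hp⟩
      rw [if_pos hp, PySem.Set.add_of_mem this]
    · rw [if_neg hp]
  · rw [PySem.Set.add_of_not_mem hx, List.filter_append]
    have hxf : x ∉ s.filter p := fun hc => hx (List.mem_filter.mp hc).1
    by_cases hp : p x = true
    · rw [if_pos hp, PySem.Set.add_of_not_mem hxf]
      simp [hp]
    · simp [hp]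

theorem pv_filter_ofList {α : Type} [BEq α] [LawfulBEq α] (xs : List α) (p : α → Bool) :
    (PySem.Set.ofList xs).filter p = PySem.Set.ofList (xs.filter p) := by
  induction xs using List.reverseRecOn with
  | nil => simp [PySem.Set.ofList_nil]
  | append_singleton xs x ih =>
    rw [PySem.Set.ofList_append_singleton, pv_filter_add, List.filter_append]
    by_cases hp : p x = true
    · rw [if_pos hp, ih]
      simp [hp, PySem.Set.ofList_append_singleton]
    · rw [if_neg hp, ih]
      simp [hp]

theorem pv_update_flatMap_ofList {α β : Type} [BEq α] [LawfulBEq α] (l : List β) (g : β → List α) (s : PySem.Set α) :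
    PySem.Set.update s (l.flatMap (fun b => PySem.Set.ofList (g b))) = PySem.Set.update s (l.flatMap g) := by
  induction l generalizing s with
  | nil => simp
  | cons a l ih =>
    rw [List.flatMap_cons, List.flatMap_cons, PySem.Set.update_append,
      PySem.Set.update_append, pv_update_ofList, ih]

theorem pv_update_flatMap_of_ofList {α β : Type} [BEq β] [LawfulBEq β] [BEq α] [LawfulBEq α] (xs : List β) (g : β → List α) (s : PySem.Set α) :
    PySem.Set.update s ((PySem.Set.ofList xs).flatMap g) = PySem.Set.update s (xs.flatMap g) := by
  induction xs using List.reverseRecOn with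
  | nil => simp [PySem.Set.ofList_nil]
  | append_singleton xs x ih =>
    rw [PySem.Set.ofList_append_singleton, List.flatMap_append, PySem.Set.update_append]
    by_cases hx : x ∈ xs
    · rw [PySem.Set.add_of_mem ((PySem.Set.mem_ofList xs x).mpr hx), ih,
        show List.flatMap g [x] = g x by simp]
      symm
      apply pv_update_of_subset
      intro y hy
      exact (PySem.Set.mem_update s (xs.flatMap g) y).mpr
        (Or.inr (List.mem_flatMap.mpr ⟨x, hx, hy⟩))
    · rw [PySem.Set.add_of_not_mem (fun hc => hx ((PySem.Set.mem_ofList xs x).mp hc)),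
        List.flatMap_append, PySem.Set.update_append, ih]

-- getD on a literal dict with Nodup keys finds the member's value
theorem pv_getD_mk {ν : Type} (data : List (String × ν)) (it : String × ν) (dflt : ν)
    (hnd : (data.map Prod.fst).Nodup) (hmem : it ∈ data) :
    (PySem.Dict.mk data).getD it.1 dflt = it.2 := by
  have hitems : (PySem.Dict.mk data).items = data := rfl
  have hkeys : (PySem.Dict.mk data).keys.Nodup := by
    rw [PySem.Dict.keys_mk]; exact hnd
  have : (it.1, it.2) ∈ (PySem.Dict.mk data).items := by rw [hitems]; exact hmem
  exact PySem.Dict.getD_of_mem_items _ this hkeys dflt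

theorem pv_tokens_eq (data : List (String × List (String × List String))) (it : String × List (String × List String))
    (hnd : (data.map Prod.fst).Nodup) (hinner : (it.2.map Prod.fst).Nodup) (hmem : it ∈ data) :
    get_tokens_for_position data it.1 = PySem.Set.ofList (pvTT it) := by
  have hc : (PySem.Dict.mk data).contains it.1 = true := by
    rw [PySem.Dict.contains_iff_mem_keys, PySem.Dict.keys_mk]
    exact List.mem_map_of_mem hmem
  unfold get_tokens_for_position
  simp only [hc, if_pos]
  rw [pv_getD_mk data it [] hnd hmem]
  have hstep : ∀ (t : PySem.Set String) (l : List String),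
      l.foldl (fun tokens suggestion => PySem.Set.add tokens (pvTok suggestion)) t
        = PySem.Set.update t (l.map pvTok) := by
    intro t l
    rw [PySem.Set.update_map_eq_foldl_add]
  simp only [hstep]
  rw [pv_foldl_update, PySem.Set.update_empty]
  have hkn : (PySem.Dict.mk it.2).keys.Nodup := by
    rw [PySem.Dict.keys_mk]; exact hinner
  have hit : (PySem.Dict.mk it.2).items = it.2 := rfl
  unfold pvTT
  conv_rhs => rw [← hit, PySem.Dict.items_eq_map_keys _ hkn []]
  rw [List.flatMap_map]

theorem pv_tokens_empty (data : List (String × List (String × List String))) (pos : String)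
    (h : pos ∉ data.map Prod.fst) :
    get_tokens_for_position data pos = PySem.Set.empty := by
  have hc : (PySem.Dict.mk data).contains pos = false := by
    rw [← Bool.not_eq_true, PySem.Dict.contains_iff_mem_keys, PySem.Dict.keys_mk]
    exact h
  unfold get_tokens_for_position
  simp [hc]

theorem pv_pairs_eq (data : List (String × List (String × List String))) :
    pvPairs data = PySem.Set.ofList (pvPL data) := by
  unfold pvPairs
  have hstep : ∀ (item : String × List (String × List String)) (p : PySem.Set (String × String))
      (l : List String),
      l.foldl (fun pairs suggestion => PySem.Set.add pairs (item.1, pvTok suggestion)) p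
        = PySem.Set.update p (l.map (fun sugg => (item.1, pvTok sugg))) := by
    intro item p l
    rw [PySem.Set.update_map_eq_foldl_add]
  simp only [hstep, pv_foldl_update]
  rw [PySem.Set.update_empty]
  unfold pvPL pvTT
  congr 1
  apply List.flatMap_congr
  intro it _
  rw [PySem.Dict.values_mk, List.flatMap_map, List.map_flatMap]
  apply List.flatMap_congr
  intro kv _
  rw [List.map_map]
  rfl

theorem pv_mem_PL (data : List (String × List (String × List String))) (pos tok : String) :
    ((pos, tok) ∈ pvPL data) ↔ ∃ it ∈ data, it.1 = pos ∧ tok ∈ pvTT it := by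
  unfold pvPL
  rw [List.mem_flatMap]
  constructor
  · rintro ⟨it, hit, hmem⟩
    obtain ⟨t, ht, heq⟩ := List.mem_map.mp hmem
    injection heq with h1 h2
    exact ⟨it, hit, h1, h2 ▸ ht⟩
  · rintro ⟨it, hit, hpos, htok⟩
    exact ⟨it, hit, List.mem_map.mpr ⟨tok, htok, by rw [hpos]⟩⟩

-- tok ∈ A's per-position token set of data2 ↔ (pos, tok) ∈ B's flattened pair list of data2
theorem pv_mem_tokens (data : List (String × List (String × List String))) (pos tok : String)
    (hnd : (data.map Prod.fst).Nodup) (hinner : ∀ p ∈ data, (p.2.map Prod.fst).Nodup) :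
    tok ∈ get_tokens_for_position data pos ↔ (pos, tok) ∈ pvPL data := by
  by_cases hpos : pos ∈ data.map Prod.fst
  · obtain ⟨it, hit, hfst⟩ := List.mem_map.mp hpos
    rw [← hfst, pv_tokens_eq data it hnd (hinner it hit) hit, PySem.Set.mem_ofList,
      pv_mem_PL]
    constructor
    · intro h; exact ⟨it, hit, rfl, h⟩
    · rintro ⟨it2, hit2, hpos2, htok2⟩
      have : it2 = it := List.inj_on_of_nodup_map hnd hit2 hit (by rw [hpos2])
      rw [← this]; exact htok2
  · rw [pv_tokens_empty data pos hpos, pv_mem_PL]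
    constructor
    · intro h; exact absurd h (List.not_mem_nil)
    · rintro ⟨it2, hit2, hpos2, _⟩
      exact absurd (hpos2 ▸ List.mem_map_of_mem hit2) hpos

-- ===== VERDICT (by name: the statement is the Claim_ definition above) =====
theorem pv_map_eq_flatMap {α β : Type} (l : List α) (f : α → β) :
    l.map f = l.flatMap (fun x => [f x]) := by
  induction l with
  | nil => rfl
  | cons a l ih => simp [ih]

theorem get_common_tokens_between_sentences_spec : Claim_equal_get_common_tokens_between_sentences := by
  unfold Claim_equal_get_common_tokens_between_sentences
  intro data1 data2 _ hpre
  obtain ⟨h1, h2, h1i, h2i⟩ := hpre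
  unfold Spec_get_common_tokens_between_sentences
  -- A's result, reduced to one flat deduplicated list
  have hA : get_common_tokens_between_sentences data1 data2
      = PySem.Set.ofList (data1.flatMap (fun it => (pvTT it).filter
          (fun tok => (get_tokens_for_position data2 it.1).contains tok))) := by
    unfold get_common_tokens_between_sentences
    rw [pv_foldl_update]
    have hu : PySem.Set.union (PySem.Set.ofList (PySem.Dict.mk data1).keys)
        (PySem.Set.ofList (PySem.Dict.mk data2).keys)
        = PySem.Set.update (PySem.Set.ofList (PySem.Dict.mk data1).keys)
            (PySem.Set.ofList (PySem.Dict.mk data2).keys) := rfl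
    rw [hu, pv_update_ofList,
      PySem.Set.update_eq_append_filter (PySem.Set.ofList (PySem.Dict.mk data1).keys)
        (PySem.Dict.mk data2).keys,
      List.flatMap_append]
    have hnil : (((PySem.Set.ofList (PySem.Dict.mk data2).keys)).filter
          (fun y => !(PySem.Set.ofList (PySem.Dict.mk data1).keys).contains y)).flatMap
          (fun pos => PySem.Set.inter (get_tokens_for_position data1 pos)
            (get_tokens_for_position data2 pos)) = [] := by
      rw [List.flatMap_eq_nil_iff]
      intro pos hpos
      have hnc := (List.mem_filter.mp hpos).2
      have hnot : pos ∉ data1.map Prod.fst := by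
        intro hc
        rw [Bool.not_eq_eq_eq_not, Bool.not_true] at hnc
        have : (PySem.Set.ofList (PySem.Dict.mk data1).keys).contains pos = true := by
          rw [PySem.Set.contains_iff, PySem.Set.mem_ofList, PySem.Dict.keys_mk]
          exact hc
        rw [this] at hnc
        exact Bool.true_eq_false.mp hnc
      rw [pv_tokens_empty data1 pos hnot]
      rfl
    rw [hnil, List.append_nil, pv_update_flatMap_of_ofList, PySem.Dict.keys_mk,
      List.flatMap_map]
    have hcongr : data1.flatMap (fun it =>
          PySem.Set.inter (get_tokens_for_position data1 it.1)
            (get_tokens_for_position data2 it.1))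
        = data1.flatMap (fun it => PySem.Set.ofList ((pvTT it).filter
            (fun tok => (get_tokens_for_position data2 it.1).contains tok))) := by
      apply List.flatMap_congr
      intro it hit
      rw [pv_tokens_eq data1 it h1 (h1i it hit) hit]
      have : PySem.Set.inter (PySem.Set.ofList (pvTT it)) (get_tokens_for_position data2 it.1)
          = (PySem.Set.ofList (pvTT it)).filter
              (fun tok => (get_tokens_for_position data2 it.1).contains tok) := rfl
      rw [this, pv_filter_ofList]
    rw [hcongr, pv_update_flatMap_ofList, PySem.Set.update_empty]
  -- B's result, reduced to the same shape
  have hB : get_common_tokens_between_sentences_alt data1 data2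
      = PySem.Set.ofList (((pvPL data1).filter
          (fun pr => (PySem.Set.ofList (pvPL data2)).contains pr)).map Prod.snd) := by
    unfold get_common_tokens_between_sentences_alt
    rw [pv_pairs_eq, pv_pairs_eq,
      ← PySem.Set.update_map_eq_foldl_add _ Prod.snd]
    have hint : PySem.Set.inter (PySem.Set.ofList (pvPL data1)) (PySem.Set.ofList (pvPL data2))
        = (PySem.Set.ofList (pvPL data1)).filter
            (fun pr => (PySem.Set.ofList (pvPL data2)).contains pr) := rfl
    rw [hint, pv_filter_ofList, pv_map_eq_flatMap, pv_update_flatMap_of_ofList,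
      ← pv_map_eq_flatMap, PySem.Set.update_empty]
  rw [hA, hB]
  congr 1
  rw [show pvPL data1 = data1.flatMap (fun it => (pvTT it).map (fun tok => (it.1, tok))) from rfl]
  rw [List.filter_flatMap, List.map_flatMap]
  apply List.flatMap_congr
  intro it hit
  rw [List.filter_map, List.map_map]
  have hmapid : ((pvTT it).filter
        ((fun pr => (PySem.Set.ofList (pvPL data2)).contains pr) ∘ fun tok => (it.1, tok))).map
        (Prod.snd ∘ fun tok => (it.1, tok))
      = (pvTT it).filter (fun tok => (PySem.Set.ofList (pvPL data2)).contains (it.1, tok)) := by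
    rw [show (Prod.snd ∘ fun tok : String => (it.1, tok)) = id from rfl, List.map_id]
    rfl
  rw [hmapid]
  apply List.filter_congr
  intro tok _
  rw [← Bool.coe_iff_coe, PySem.Set.contains_iff, PySem.Set.contains_iff, PySem.Set.mem_ofList]
  exact pv_mem_tokens data2 it.1 tok h2 h2i
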